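-- pv_equiv track=rewrite | github.com/zackbatist/CITF-Postdoc | qc-atelier/qc-atelier-server.py | to_qc_yaml
-- ===== SOURCE A (Python) =====
-- def to_qc_yaml(tree, overrides=None):
--     """Produce a qc-compatible bare-list codebook YAML from the tree.
--
--     Format matches what qc's parse_codebook_yaml expects:
--         - RootCode:
--           - ChildCode
--           - ParentWithKids:
--             - Grandchild
--         - AnotherRoot
--
--     This is the only YAML written — it is purely for qc consumption.
--     All documentation lives in the JSON sidecar.
--     """
--     overrides = overrides or {}
--     lines = [
--         "# codebook.yaml — generated by qc-scheme",
--         "# qc-compatible format: bare list, no documentation fields.",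
--         "# Edit documentation in qc-scheme; do not hand-edit structure here.",
--         "",
--     ]
--
--     # Build effective parent/children from tree + overrides
--     children = {}   # parent -> [child, ...]
--     roots    = []
--     for node in tree:
--         name   = node.get("name", "")
--         parent = overrides.get(name, node.get("parent", "")) or ""
--         if not parent:
--             roots.append(name)
--         else:
--             children.setdefault(parent, []).append(name)
--
--     def write_node(name, depth):
--         pad = "  " * depth
--         kids = children.get(name, [])
--         if kids:
--             lines.append(f"{pad}- {name}:")
--             for kid in kids:
--                 write_node(kid, depth + 1)
--         else:
--             lines.append(f"{pad}- {name}")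
--
--     for root in roots:
--         write_node(root, 0)
--
--     lines.append("")
--     return "\n".join(lines)
-- ===== SOURCE B (Python) =====
-- def to_qc_yaml(tree, overrides=None):
--     """Same YAML, but without the parent->children dict: the effective
--     (parent, name) pairs are computed once and children are found by
--     scanning that list, each subtree rendered as its own list of lines."""
--     ov = overrides or {}
--     pairs = []
--     for node in tree:
--         name = node.get("name", "")
--         pairs.append((ov.get(name, node.get("parent", "")) or "", name))
--
--     def render(name, depth):
--         kids = [n for p, n in pairs if p and p == name]
--         if not kids:
--             return ["  " * depth + "- " + name]
--         out = ["  " * depth + "- " + name + ":"]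
--         for k in kids:
--             out += render(k, depth + 1)
--         return out
--
--     header = [
--         "# codebook.yaml — generated by qc-scheme",
--         "# qc-compatible format: bare list, no documentation fields.",
--         "# Edit documentation in qc-scheme; do not hand-edit structure here.",
--         "",
--     ]
--     body = [line for p, n in pairs if not p for line in render(n, 0)]
--     return "\n".join(header + body + [""])
-- ===== Notes on version B (the rewrite author's own statement) =====
-- stated objective: simpler
-- what changed: B drops A's parent->children dict and roots list entirely: it computes the effective (parent, name) pairs once, finds each node's children by filtering that list on demand, and renders each subtree as its own list of lines (pure list-building) instead of appending to one shared lines accumulator.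
import Mathlib
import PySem

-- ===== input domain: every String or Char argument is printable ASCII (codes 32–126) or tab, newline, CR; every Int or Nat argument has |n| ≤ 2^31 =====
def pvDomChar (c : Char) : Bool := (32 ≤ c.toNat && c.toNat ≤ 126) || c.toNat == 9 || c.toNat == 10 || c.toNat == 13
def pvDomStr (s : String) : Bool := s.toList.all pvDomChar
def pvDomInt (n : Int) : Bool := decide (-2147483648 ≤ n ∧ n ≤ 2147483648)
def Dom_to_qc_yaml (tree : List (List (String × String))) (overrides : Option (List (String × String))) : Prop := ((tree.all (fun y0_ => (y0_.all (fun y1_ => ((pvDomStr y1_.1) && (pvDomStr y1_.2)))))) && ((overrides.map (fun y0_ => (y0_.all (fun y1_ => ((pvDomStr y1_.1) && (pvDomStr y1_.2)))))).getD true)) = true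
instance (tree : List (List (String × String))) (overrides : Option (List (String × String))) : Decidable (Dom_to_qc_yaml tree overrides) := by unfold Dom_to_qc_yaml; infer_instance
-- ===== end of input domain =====

-- B replaces A's parent->children dict + roots list by a once-computed (parent, name) pair list
-- scanned on demand, and builds each subtree's lines purely instead of appending to a shared
-- accumulator: simpler, same output.

-- ===== PORT A =====

-- "  " * depth
def pvPadA (depth : Nat) : String := String.join (List.replicate depth "  ")

-- one iteration of A's building loop over `tree` (state = (children, roots))
def pvStepA (ov : PySem.Dict String String) (st : PySem.Dict String (List String) × List String)
    (node : List (String × String)) : PySem.Dict String (List String) × List String :=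
  let name := (PySem.Dict.mk node).getD "name" ""
  let parent0 := ov.getD name ((PySem.Dict.mk node).getD "parent" "")
  let parent := if parent0 = "" then "" else parent0    -- `… or ""`
  if parent = "" then (st.1, st.2 ++ [name])
  else (st.1.insert parent (st.1.getD parent [] ++ [name]), st.2)  -- children.setdefault(parent, []).append(name)

-- write_node, threading the `lines` accumulator; fuel bounds the recursion depth (on inputs
-- where a duplicated name makes a node its own descendant the Python recursion does not
-- terminate (RecursionError); everywhere else the depth is below tree.length + 1)
def pvWriteA (children : PySem.Dict String (List String)) : Nat → String → Nat → List String → List String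
  | 0, _, _, lines => lines
  | fuel + 1, name, depth, lines =>
    let pad := pvPadA depth
    let kids := children.getD name []
    if kids ≠ [] then
      kids.foldl (fun ls k => pvWriteA children fuel k (depth + 1) ls)
        (lines ++ [pad ++ "- " ++ name ++ ":"])
    else lines ++ [pad ++ "- " ++ name]

def to_qc_yaml (tree : List (List (String × String))) (overrides : Option (List (String × String))) : String :=
  let ov : PySem.Dict String String := PySem.Dict.mk (overrides.getD [])   -- overrides or {}
  let lines : List String :=
    ["# codebook.yaml — generated by qc-scheme",
     "# qc-compatible format: bare list, no documentation fields.",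
     "# Edit documentation in qc-scheme; do not hand-edit structure here.",
     ""]
  let st := tree.foldl (pvStepA ov) (PySem.Dict.empty, [])
  let lines2 := st.2.foldl (fun ls r => pvWriteA st.1 (tree.length + 1) r 0 ls) lines
  PySem.Str.join "\n" (lines2 ++ [""])

-- ===== PORT B =====

-- "  " * depth
def pvPadB (depth : Nat) : String := String.join (List.replicate depth "  ")

-- the effective (parent, name) pair of every node, computed once
def pvPairsB (ov : PySem.Dict String String) (tree : List (List (String × String))) : List (String × String) :=
  tree.map (fun node =>
    let name := (PySem.Dict.mk node).getD "name" ""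
    let p := ov.getD name ((PySem.Dict.mk node).getD "parent" "")
    (if p = "" then "" else p, name))

-- [n for p, n in pairs if p and p == name]
def pvKidsB (pairs : List (String × String)) (name : String) : List String :=
  (pairs.filter (fun q => decide (q.1 ≠ "" ∧ q.1 = name))).map (·.2)

-- render(name, depth): the subtree's lines as a fresh list; fuel as in pvWriteA
def pvRenderB (pairs : List (String × String)) : Nat → String → Nat → List String
  | 0, _, _ => []
  | fuel + 1, name, depth =>
    let kids := pvKidsB pairs name
    if kids = [] then [pvPadB depth ++ "- " ++ name]
    else (pvPadB depth ++ "- " ++ name ++ ":") ::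
      kids.flatMap (fun k => pvRenderB pairs fuel k (depth + 1))

def to_qc_yaml_alt (tree : List (List (String × String))) (overrides : Option (List (String × String))) : String :=
  let pairs := pvPairsB (PySem.Dict.mk (overrides.getD [])) tree
  let header : List String :=
    ["# codebook.yaml — generated by qc-scheme",
     "# qc-compatible format: bare list, no documentation fields.",
     "# Edit documentation in qc-scheme; do not hand-edit structure here.",
     ""]
  let body := ((pairs.filter (fun q => decide (q.1 = ""))).map (·.2)).flatMap
      (fun n => pvRenderB pairs (tree.length + 1) n 0)
  PySem.Str.join "\n" (header ++ body ++ [""])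

-- ===== PRECONDITION & SPEC =====
def Spec_to_qc_yaml (tree : List (List (String × String))) (overrides : Option (List (String × String))) (out : String) : Prop := out = to_qc_yaml_alt tree overrides
instance (tree : List (List (String × String))) (overrides : Option (List (String × String))) (out : String) : Decidable (Spec_to_qc_yaml tree overrides out) := by unfold Spec_to_qc_yaml; infer_instance

-- ===== CLAIM (what is proved, stated in full; the proofs are below) =====
def Claim_equal_to_qc_yaml : Prop := ∀ (tree : List (List (String × String))) (overrides : Option (List (String × String))), Dom_to_qc_yaml tree overrides → Spec_to_qc_yaml tree overrides (to_qc_yaml tree overrides)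

-- ===== LEMMAS AND PROOFS =====

-- `x or ""` on strings is the identity (both Pythons carry the same redundant step)
lemma pv_or_empty (s : String) : (if s = "" then "" else s) = s := by
  split_ifs with h
  · exact h.symm
  · rfl

-- A's children dict, read back at any key, is B's on-demand filter of the pair list
lemma pv_children_getD (ov : PySem.Dict String String) (tree : List (List (String × String)))
    (c : PySem.Dict String (List String)) (r : List String) (p : String) :
    ((tree.foldl (pvStepA ov) (c, r)).1).getD p [] = c.getD p [] ++ pvKidsB (pvPairsB ov tree) p := by
  induction tree generalizing c r with
  | nil => simp [pvPairsB, pvKidsB]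
  | cons node t ih =>
    simp only [List.foldl_cons]
    rw [ih]
    simp only [pvStepA, pvPairsB, pvKidsB, List.map_cons, List.filter_cons, pv_or_empty]
    by_cases hp : ov.getD ((PySem.Dict.mk node).getD "name" "") ((PySem.Dict.mk node).getD "parent" "") = ""
    · simp [hp]
    · by_cases hpp : ov.getD ((PySem.Dict.mk node).getD "name" "") ((PySem.Dict.mk node).getD "parent" "") = p
      · subst hpp
        simp [hp]
      · simp [hp, hpp, Ne.symm hpp, PySem.Dict.getD_insert]

-- A's roots list is B's filter of the pair list
lemma pv_roots (ov : PySem.Dict String String) (tree : List (List (String × String)))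
    (c : PySem.Dict String (List String)) (r : List String) :
    (tree.foldl (pvStepA ov) (c, r)).2 = r ++ ((pvPairsB ov tree).filter (fun q => decide (q.1 = ""))).map (·.2) := by
  induction tree generalizing c r with
  | nil => simp [pvPairsB]
  | cons node t ih =>
    simp only [List.foldl_cons]
    rw [ih]
    simp only [pvStepA, pvPairsB, List.map_cons, List.filter_cons, pv_or_empty]
    by_cases hp : ov.getD ((PySem.Dict.mk node).getD "name" "") ((PySem.Dict.mk node).getD "parent" "") = ""
    · simp [hp]
    · simp [hp]

-- the recursive writer with accumulator is the pure renderer, appended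
lemma pv_write_eq (pairs : List (String × String)) (children : PySem.Dict String (List String))
    (h : ∀ p, children.getD p [] = pvKidsB pairs p) :
    ∀ (fuel : Nat) (name : String) (depth : Nat) (lines : List String),
      pvWriteA children fuel name depth lines = lines ++ pvRenderB pairs fuel name depth := by
  intro fuel
  induction fuel with
  | zero => intro name depth lines; simp [pvWriteA, pvRenderB]
  | succ f ih =>
    intro name depth lines
    simp only [pvWriteA, pvRenderB, h name]
    by_cases hk : pvKidsB pairs name = []
    · simp [hk, pvPadA, pvPadB]
    · simp only [hk, ne_eq, not_false_iff, if_pos]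
      have hfun : (fun ls k => pvWriteA children f k (depth + 1) ls)
          = (fun ls k => ls ++ pvRenderB pairs f k (depth + 1)) := by
        funext ls k; exact ih k (depth + 1) ls
      rw [hfun, PySem.List.foldl_append_eq_flatMap]
      simp [pvPadA, pvPadB]

-- ===== VERDICT (by name: the statement is the Claim_ definition above) =====
theorem to_qc_yaml_spec : Claim_equal_to_qc_yaml := by
  intro tree overrides _hDom
  unfold Spec_to_qc_yaml to_qc_yaml to_qc_yaml_alt
  dsimp only
  have hc : ∀ p, ((tree.foldl (pvStepA (PySem.Dict.mk (overrides.getD []))) (PySem.Dict.empty, [])).1).getD p []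
      = pvKidsB (pvPairsB (PySem.Dict.mk (overrides.getD [])) tree) p := by
    intro p
    rw [pv_children_getD]
    simp [PySem.Dict.getD_empty]
  have hfun : (fun ls r => pvWriteA (tree.foldl (pvStepA (PySem.Dict.mk (overrides.getD []))) (PySem.Dict.empty, [])).1 (tree.length + 1) r 0 ls)
      = (fun ls r => ls ++ pvRenderB (pvPairsB (PySem.Dict.mk (overrides.getD [])) tree) (tree.length + 1) r 0) := by
    funext ls r
    exact pv_write_eq _ _ hc (tree.length + 1) r 0 ls
  rw [pv_roots, hfun, PySem.List.foldl_append_eq_flatMap]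
  simp
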